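-- pv_equiv track=rewrite | github.com/AkhileshChaikam/OnlineForums | project/validate.py | mob1
-- ===== SOURCE A (Python) =====
-- def find_length(str1):
--     len1=0
--     for char in str1:
--         len1+=1
--     return len1
--
-- def mob1(input):
--     l=find_length(input)
--     if l==10:
--         for i in range(l):
--             if i==0:
--                 if input[i]=='0':
--                     return "error"
--             if ord(input[i])>=48 and ord(input[i])<=57:
--                 continue
--             else:
--                 return "error"
--     else:
--          return "error"
--     return "valid mobile number "
-- ===== SOURCE B (Python) =====
-- import re
--
-- _MOB = re.compile(r'[1-9][0-9]{9}')
--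
-- def mob1(input):
--     return "valid mobile number " if _MOB.fullmatch(input) else "error"
-- ===== Notes on version B (the rewrite author's own statement) =====
-- stated objective: idiomatic
-- what changed: Replaced the hand-rolled length count and per-character ord-range loop with a single precompiled regex fullmatch of [1-9][0-9]{9}.
import Mathlib
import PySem

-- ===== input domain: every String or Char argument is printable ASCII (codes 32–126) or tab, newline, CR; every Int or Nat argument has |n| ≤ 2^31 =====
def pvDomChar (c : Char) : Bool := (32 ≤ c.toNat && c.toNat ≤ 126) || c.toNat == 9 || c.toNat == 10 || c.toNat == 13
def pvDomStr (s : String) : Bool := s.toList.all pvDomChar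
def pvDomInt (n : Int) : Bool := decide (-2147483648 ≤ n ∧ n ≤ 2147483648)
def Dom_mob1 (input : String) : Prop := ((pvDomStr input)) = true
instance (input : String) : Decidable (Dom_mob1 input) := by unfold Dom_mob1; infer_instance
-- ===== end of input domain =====

-- B replaces A's hand-rolled length count and per-character ord-range loop by one
-- regex fullmatch of [1-9][0-9]{9} (idiomatic; same cost).

-- ===== PORT A =====
-- find_length: counts characters with a loop
def findLength (str1 : List Char) : Int := str1.foldl (fun len1 _ => len1 + 1) 0

-- the body of A's `for i in range(l)` loop: i is the running index, the list holds
-- input[i], input[i+1], …; returns `some "error"` on early return, `none` if the loop ends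
def mob1Go (i : Nat) : List Char → Option String
  | [] => none
  | c :: rest =>
    if i == 0 && c == '0' then some "error"
    else if 48 ≤ c.toNat && c.toNat ≤ 57 then mob1Go (i + 1) rest
    else some "error"

def mob1 (input : String) : String :=
  let l := findLength input.toList
  if l == 10 then
    match mob1Go 0 input.toList with
    | some e => e
    | none => "valid mobile number "
  else "error"

-- ===== PORT B =====
-- transcription of re.fullmatch(r'[1-9][0-9]{9}', input): first char in class 1-9,
-- then exactly nine chars in class 0-9
def mob1_alt (input : String) : String :=
  match input.toList with
  | [] => "error"
  | c :: rest =>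
    if (49 ≤ c.toNat && c.toNat ≤ 57)
        && rest.length == 9
        && rest.all (fun d => 48 ≤ d.toNat && d.toNat ≤ 57)
    then "valid mobile number " else "error"

-- ===== PRECONDITION & SPEC =====
def Spec_mob1 (input : String) (out : String) : Prop := out = mob1_alt input
instance (input : String) (out : String) : Decidable (Spec_mob1 input out) := by unfold Spec_mob1; infer_instance

-- ===== CLAIM (what is proved, stated in full; the proofs are below) =====
def Claim_equal_mob1 : Prop := ∀ (input : String), Dom_mob1 input → Spec_mob1 input (mob1 input)

-- ===== LEMMAS AND PROOFS =====

theorem foldl_count (cs : List Char) (a : Int) :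
    cs.foldl (fun len1 _ => len1 + 1) a = a + cs.length := by
  induction cs generalizing a with
  | nil => simp
  | cons c t ih => simp [List.foldl, ih]; ring

theorem findLength_eq (cs : List Char) : findLength cs = (cs.length : Int) := by
  simp [findLength, foldl_count]

-- for positive index the i==0 branch is dead: the loop just checks all chars are digits
theorem mob1Go_pos (cs : List Char) (i : Nat) :
    mob1Go (i + 1) cs =
      if cs.all (fun d => 48 ≤ d.toNat && d.toNat ≤ 57) then none else some "error" := by
  induction cs generalizing i with
  | nil => simp [mob1Go]
  | cons c rest ih =>
    by_cases h : (decide (48 ≤ c.toNat) && decide (c.toNat ≤ 57)) = true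
    · simp [mob1Go, h, ih]
    · rw [Bool.not_eq_true] at h
      simp [mob1Go, h]

theorem mob1_spec_aux (input : String) : mob1 input = mob1_alt input := by
  unfold mob1 mob1_alt
  rw [findLength_eq]
  cases hcs : input.toList with
  | nil => simp
  | cons c rest =>
    simp only [List.length_cons]
    by_cases hlen : rest.length = 9
    · have h10 : ((((rest.length + 1 : Nat) : Int)) == 10) = true := by simp [hlen]
      rw [if_pos h10]
      simp only [mob1Go]
      by_cases h0 : c = '0'
      · simp [h0]
      · have hne : (c == '0') = false := by simp [h0]
        rw [show ((0 == 0 : Bool) && (c == '0')) = false by simp [hne]]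
        rw [if_neg (by simp)]
        rw [mob1Go_pos]
        have h48 : c.toNat ≠ 48 := fun h =>
          h0 (Char.ext (UInt32.toNat_inj.mp (by rw [show c.val.toNat = 48 from h]; rfl)))
        have hrl : (rest.length == 9) = true := by simp [hlen]
        by_cases hc : (decide (48 ≤ c.toNat) && decide (c.toNat ≤ 57)) = true
        · have hc9 : (decide (49 ≤ c.toNat) && decide (c.toNat ≤ 57)) = true := by
            simp only [Bool.and_eq_true, decide_eq_true_eq] at hc ⊢; omega
          rw [if_pos hc]
          cases hall : rest.all (fun d => decide (48 ≤ d.toNat) && decide (d.toNat ≤ 57)) with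
          | true => simp [hc9, hrl]
          | false => simp [hc9, hrl]
        · have hc9 : (decide (49 ≤ c.toNat) && decide (c.toNat ≤ 57)) = false := by
            simp only [Bool.and_eq_true, decide_eq_true_eq] at hc
            simp only [Bool.and_eq_false_iff, decide_eq_false_iff_not]
            omega
          rw [Bool.not_eq_true] at hc
          rw [if_neg (by simp [hc])]
          rw [hc9]
          rfl
    · rw [if_neg (by simp; omega)]
      have : (rest.length == 9) = false := by simp [hlen]
      simp [this]

-- ===== VERDICT (by name: the statement is the Claim_ definition above) =====
theorem mob1_spec : Claim_equal_mob1 := by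
  intro input _
  exact mob1_spec_aux input
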